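-- pv_equiv track=rewrite | github.com/tcpearce/mmf-pmf-analysis | pmf_source_apportionment_fixed.py | _get_species_colors
-- ===== SOURCE A (Python) =====
-- def _get_species_colors(species_names):
--     """Get consistent colors for chemical species by category."""
--     species_colors = {}
--
--     # Define color schemes by pollutant type
--     gas_colors = ['#e74c3c', '#c0392b', '#a93226']  # Red tones for gases
--     voc_colors = ['#8e44ad', '#7d3c98', '#6c3483', '#5b2c6f']  # Purple tones for VOCs
--     pm_colors = ['#3498db', '#2980b9', '#1f618d', '#1a5490', '#154360']  # Blue tones for PM
--
--     gas_idx = 0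
--     voc_idx = 0
--     pm_idx = 0
--
--     for species in species_names:
--         species_upper = species.upper()
--
--         # Assign colors by species type
--         if any(gas in species_upper for gas in ['H2S', 'CH4', 'SO2', 'NOX', 'NO', 'NO2']):
--             species_colors[species] = gas_colors[gas_idx % len(gas_colors)]
--             gas_idx += 1
--         elif any(voc in species_upper for voc in ['BENZENE', 'TOLUENE', 'ETHYLBENZENE', 'XYLENE']):
--             species_colors[species] = voc_colors[voc_idx % len(voc_colors)]
--             voc_idx += 1
--         elif any(pm in species_upper for pm in ['PM1', 'PM2.5', 'PM4', 'PM10', 'TSP']):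
--             species_colors[species] = pm_colors[pm_idx % len(pm_colors)]
--             pm_idx += 1
--         else:
--             # Default color for unknown species
--             species_colors[species] = '#95a5a6'  # Gray
--
--     return species_colors
-- ===== SOURCE B (Python) =====
-- def _get_species_colors(species_names):
--     """Get consistent colors for chemical species by category."""
--     GAS = ['H2S', 'CH4', 'SO2', 'NOX', 'NO', 'NO2']
--     VOC = ['BENZENE', 'TOLUENE', 'ETHYLBENZENE', 'XYLENE']
--     PM = ['PM1', 'PM2.5', 'PM4', 'PM10', 'TSP']
--
--     def classify(species):
--         u = species.upper()
--         if any(g in u for g in GAS):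
--             return 'gas'
--         if any(v in u for v in VOC):
--             return 'voc'
--         if any(p in u for p in PM):
--             return 'pm'
--         return 'other'
--
--     palettes = {
--         'gas': ['#e74c3c', '#c0392b', '#a93226'],
--         'voc': ['#8e44ad', '#7d3c98', '#6c3483', '#5b2c6f'],
--         'pm': ['#3498db', '#2980b9', '#1f618d', '#1a5490', '#154360'],
--         'other': ['#95a5a6'],
--     }
--
--     # First pass: group species by category, preserving appearance order.
--     groups = {'gas': [], 'voc': [], 'pm': [], 'other': []}
--     for s in species_names:
--         groups[classify(s)].append(s)
--
--     # Second pass: rotate each category's palette over its members.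
--     colors = {}
--     for cat, members in groups.items():
--         pal = palettes[cat]
--         for i, s in enumerate(members):
--             colors[s] = pal[i % len(pal)]
--
--     # Emit in original first-appearance order.
--     return {s: colors[s] for s in species_names}
-- ===== Notes on version B (the rewrite author's own statement) =====
-- stated objective: alternative
-- what changed: A threads three per-category counters through one interleaved pass; B first groups species by category into a dict of lists, then rotates each category's palette over its members by enumeration, and finally emits the colors in original appearance order.
import Mathlib
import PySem

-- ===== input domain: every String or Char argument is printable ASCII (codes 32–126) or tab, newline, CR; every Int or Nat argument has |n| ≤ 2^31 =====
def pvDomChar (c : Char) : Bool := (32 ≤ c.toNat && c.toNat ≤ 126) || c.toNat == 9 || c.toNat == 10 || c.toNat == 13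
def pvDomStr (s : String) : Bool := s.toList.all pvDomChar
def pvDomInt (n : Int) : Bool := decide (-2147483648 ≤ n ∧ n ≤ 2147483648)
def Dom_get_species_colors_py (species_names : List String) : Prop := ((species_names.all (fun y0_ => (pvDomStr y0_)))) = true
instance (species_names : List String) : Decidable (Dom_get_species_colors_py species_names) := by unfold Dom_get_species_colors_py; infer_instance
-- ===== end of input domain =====

-- B groups species by category in one pass and then rotates each category's palette over its
-- members, instead of A's single interleaved pass threading three counters (objective: alternative
-- decomposition, same cost; return-value equivalence only — neither program mutates its argument).

-- ===== PORT A =====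
-- shared literal constants (the substring tables and palettes both Pythons spell out)
def pvGasSubs : List String := ["H2S", "CH4", "SO2", "NOX", "NO", "NO2"]
def pvVocSubs : List String := ["BENZENE", "TOLUENE", "ETHYLBENZENE", "XYLENE"]
def pvPmSubs : List String := ["PM1", "PM2.5", "PM4", "PM10", "TSP"]
def pvGasPal : List String := ["#e74c3c", "#c0392b", "#a93226"]
def pvVocPal : List String := ["#8e44ad", "#7d3c98", "#6c3483", "#5b2c6f"]
def pvPmPal : List String := ["#3498db", "#2980b9", "#1f618d", "#1a5490", "#154360"]

def get_species_colors_py (species_names : List String) : List (String × String) :=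
  (species_names.foldl
    (fun (st : PySem.Dict String String × Int × Int × Int) species =>
      let su := PySem.Str.upper species
      if pvGasSubs.any (fun gas => PySem.Str.isIn gas su) then
        (st.1.insert species (PySem.List.pyGetD pvGasPal (PySem.Int.mod st.2.1 ((pvGasPal.length : Int))) ""),
         st.2.1 + 1, st.2.2.1, st.2.2.2)
      else if pvVocSubs.any (fun voc => PySem.Str.isIn voc su) then
        (st.1.insert species (PySem.List.pyGetD pvVocPal (PySem.Int.mod st.2.2.1 ((pvVocPal.length : Int))) ""),
         st.2.1, st.2.2.1 + 1, st.2.2.2)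
      else if pvPmSubs.any (fun pm => PySem.Str.isIn pm su) then
        (st.1.insert species (PySem.List.pyGetD pvPmPal (PySem.Int.mod st.2.2.2 ((pvPmPal.length : Int))) ""),
         st.2.1, st.2.2.1, st.2.2.2 + 1)
      else
        (st.1.insert species "#95a5a6", st.2.1, st.2.2.1, st.2.2.2))
    (PySem.Dict.empty, 0, 0, 0)).1.items

-- ===== PORT B =====
def classify_alt (species : String) : String :=
  let u := PySem.Str.upper species
  if pvGasSubs.any (fun gas => PySem.Str.isIn gas u) then "gas"
  else if pvVocSubs.any (fun voc => PySem.Str.isIn voc u) then "voc"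
  else if pvPmSubs.any (fun pm => PySem.Str.isIn pm u) then "pm"
  else "other"

def pvPalettes : PySem.Dict String (List String) :=
  PySem.Dict.ofList [("gas", pvGasPal), ("voc", pvVocPal), ("pm", pvPmPal), ("other", ["#95a5a6"])]

def get_species_colors_py_alt (species_names : List String) : List (String × String) :=
  let groups := species_names.foldl
    (fun d s => d.modify (classify_alt s) [] (fun l => l ++ [s]))
    (PySem.Dict.ofList [("gas", ([] : List String)), ("voc", []), ("pm", []), ("other", [])])
  let colors := groups.items.foldl
    (fun cd p =>
      let pal := pvPalettes.getD p.1 []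
      (PySem.List.enumerate p.2).foldl
        (fun cd q => cd.insert q.2 (PySem.List.pyGetD pal (PySem.Int.mod q.1 ((pal.length : Int))) "")) cd)
    PySem.Dict.empty
  (species_names.foldl (fun d s => d.insert s (colors.getD s "")) PySem.Dict.empty).items

-- ===== PRECONDITION & SPEC =====
def Spec_get_species_colors_py (species_names : List String) (out : List (String × String)) : Prop := out = get_species_colors_py_alt species_names
instance (species_names : List String) (out : List (String × String)) : Decidable (Spec_get_species_colors_py species_names out) := by unfold Spec_get_species_colors_py; infer_instance

-- ===== CLAIM (what is proved, stated in full; the proofs are below) =====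
def Claim_equal_get_species_colors_py : Prop := ∀ (species_names : List String), Dom_get_species_colors_py species_names → Spec_get_species_colors_py species_names (get_species_colors_py species_names)

-- ===== LEMMAS AND PROOFS =====

-- annotation of A's loop: each species paired with the value its category counter had
def pvAnn : List String → Int → Int → Int → Int → List (String × Int)
  | [], _, _, _, _ => []
  | s :: t, g, v, p, o =>
    if classify_alt s = "gas" then (s, g) :: pvAnn t (g + 1) v p o
    else if classify_alt s = "voc" then (s, v) :: pvAnn t g (v + 1) p o
    else if classify_alt s = "pm" then (s, p) :: pvAnn t g v (p + 1) o
    else (s, o) :: pvAnn t g v p (o + 1)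

def pvColorFor (q : String × Int) : String :=
  if classify_alt q.1 = "gas" then PySem.List.pyGetD pvGasPal (PySem.Int.mod q.2 ((pvGasPal.length : Int))) ""
  else if classify_alt q.1 = "voc" then PySem.List.pyGetD pvVocPal (PySem.Int.mod q.2 ((pvVocPal.length : Int))) ""
  else if classify_alt q.1 = "pm" then PySem.List.pyGetD pvPmPal (PySem.Int.mod q.2 ((pvPmPal.length : Int))) ""
  else "#95a5a6"

lemma pv_classify_cases (s : String) :
    classify_alt s = "gas" ∨ classify_alt s = "voc" ∨ classify_alt s = "pm" ∨ classify_alt s = "other" := by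
  simp only [classify_alt]; split_ifs <;> simp

lemma pvAnn_map_fst (xs : List String) : ∀ g v p o, (pvAnn xs g v p o).map Prod.fst = xs := by
  induction xs with
  | nil => intro g v p o; rfl
  | cons s t ih =>
    intro g v p o
    rcases pv_classify_cases s with h | h | h | h <;> simp [pvAnn, h, ih]


-- last-value characterisation of a dict built by inserting key/value pairs
lemma pv_getD_foldl_ins (l : List (String × String)) :
    ∀ (d : PySem.Dict String String) (k : String),
    (l.foldl (fun d p => d.insert p.1 p.2) d).getD k "" =
    ((l.reverse.find? (fun p => p.1 == k)).map Prod.snd).getD (d.getD k "") := by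
  induction l with
  | nil => intro d k; simp
  | cons q t ih =>
    intro d k
    simp only [List.foldl_cons, List.reverse_cons, List.find?_append, ih]
    cases hf : t.reverse.find? (fun p => p.1 == k) with
    | some a => simp
    | none =>
      simp only [Option.none_or, Option.map_none, Option.getD_none, List.find?_singleton]
      rw [PySem.Dict.getD_insert]
      by_cases h : q.1 = k
      · simp [h]
      · rw [if_neg (fun hk => h hk.symm)]
        simp [show (q.1 == k) = false from beq_eq_false_iff_ne.mpr h]

lemma pv_getD_foldl_ins_not_mem (l : List (String × String)) (d : PySem.Dict String String)
    (k : String) (h : k ∉ l.map Prod.fst) :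
    (l.foldl (fun d p => d.insert p.1 p.2) d).getD k "" = d.getD k "" := by
  rw [pv_getD_foldl_ins]
  have hn : l.reverse.find? (fun p => p.1 == k) = none := by
    rw [List.find?_eq_none]
    intro p hp
    simp only [beq_iff_eq]
    intro hpk
    exact h (List.mem_map.mpr ⟨p, List.mem_reverse.mp hp, hpk⟩)
  simp [hn]

lemma pv_find?_filter {α : Type} (l : List α) (p q : α → Bool)
    (h : ∀ x, p x = true → q x = true) : (l.filter q).find? p = l.find? p := by
  induction l with
  | nil => rfl
  | cons a t ih =>
    by_cases hq : q a
    · by_cases hp : p a <;> simp [hq, hp, ih]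
    · have hp : p a = false := by
        cases hpa : p a
        · rfl
        · exact absurd (h a hpa) (by simp [hq])
      simp [hq, hp, ih]

lemma pvAnn_map_indep (t : List String) : ∀ (g v p o o' : Int),
    (pvAnn t g v p o).map (fun q => (q.1, pvColorFor q)) =
    (pvAnn t g v p o').map (fun q => (q.1, pvColorFor q)) := by
  induction t with
  | nil => intro g v p o o'; rfl
  | cons s t ih =>
    intro g v p o o'
    rcases pv_classify_cases s with h | h | h | h
    · simp [pvAnn, h]; exact ih (g + 1) v p o o'
    · simp [pvAnn, h]; exact ih g (v + 1) p o o'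
    · simp [pvAnn, h]; exact ih g v (p + 1) o o'
    · simp [pvAnn, h, show pvColorFor (s, o) = pvColorFor (s, o') from by simp [pvColorFor, h]]
      exact ih g v p (o + 1) (o' + 1)

-- A's interleaved loop equals an insert-fold over the counter-annotated list
lemma pvA_loop (xs : List String) :
    ∀ (d : PySem.Dict String String) (g v p o : Int),
    (xs.foldl
      (fun (st : PySem.Dict String String × Int × Int × Int) species =>
        let su := PySem.Str.upper species
        if pvGasSubs.any (fun gas => PySem.Str.isIn gas su) then
          (st.1.insert species (PySem.List.pyGetD pvGasPal (PySem.Int.mod st.2.1 ((pvGasPal.length : Int))) ""),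
           st.2.1 + 1, st.2.2.1, st.2.2.2)
        else if pvVocSubs.any (fun voc => PySem.Str.isIn voc su) then
          (st.1.insert species (PySem.List.pyGetD pvVocPal (PySem.Int.mod st.2.2.1 ((pvVocPal.length : Int))) ""),
           st.2.1, st.2.2.1 + 1, st.2.2.2)
        else if pvPmSubs.any (fun pm => PySem.Str.isIn pm su) then
          (st.1.insert species (PySem.List.pyGetD pvPmPal (PySem.Int.mod st.2.2.2 ((pvPmPal.length : Int))) ""),
           st.2.1, st.2.2.1, st.2.2.2 + 1)
        else
          (st.1.insert species "#95a5a6", st.2.1, st.2.2.1, st.2.2.2))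
      (d, g, v, p)).1
    = ((pvAnn xs g v p o).map (fun q => (q.1, pvColorFor q))).foldl
        (fun d r => d.insert r.1 r.2) d := by
  induction xs with
  | nil => intro d g v p o; rfl
  | cons s t ih =>
    intro d g v p o
    by_cases h1 : pvGasSubs.any (fun gas => PySem.Str.isIn gas (PySem.Str.upper s)) = true
    · have hc : classify_alt s = "gas" := by unfold classify_alt; rw [if_pos h1]
      rw [List.foldl_cons]
      dsimp only
      simp only [h1, if_true]
      rw [ih _ _ _ _ o]
      simp [pvAnn, hc, pvColorFor]
    · rw [Bool.not_eq_true] at h1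
      by_cases h2 : pvVocSubs.any (fun voc => PySem.Str.isIn voc (PySem.Str.upper s)) = true
      · have hc : classify_alt s = "voc" := by
          unfold classify_alt; rw [if_neg (by rw [h1]; simp), if_pos h2]
        rw [List.foldl_cons]
        dsimp only
        simp only [h1, h2, if_true, Bool.false_eq_true, if_false]
        rw [ih _ _ _ _ o]
        simp [pvAnn, hc, pvColorFor]
      · rw [Bool.not_eq_true] at h2
        by_cases h3 : pvPmSubs.any (fun pm => PySem.Str.isIn pm (PySem.Str.upper s)) = true
        · have hc : classify_alt s = "pm" := by
            unfold classify_alt; rw [if_neg (by rw [h1]; simp), if_neg (by rw [h2]; simp), if_pos h3]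
          rw [List.foldl_cons]
          dsimp only
          simp only [h1, h2, h3, if_true, Bool.false_eq_true, if_false]
          rw [ih _ _ _ _ o]
          simp [pvAnn, hc, pvColorFor]
        · rw [Bool.not_eq_true] at h3
          have hc : classify_alt s = "other" := by
            unfold classify_alt
            rw [if_neg (by rw [h1]; simp), if_neg (by rw [h2]; simp), if_neg (by rw [h3]; simp)]
          rw [List.foldl_cons]
          dsimp only
          simp only [h1, h2, h3, Bool.false_eq_true, if_false]
          rw [ih _ _ _ _ o]
          have he : pvAnn (s :: t) g v p o = (s, o) :: pvAnn t g v p (o + 1) := by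
            simp [pvAnn, hc]
          rw [he, List.map_cons, List.foldl_cons]
          have hcol : pvColorFor (s, o) = "#95a5a6" := by simp [pvColorFor, hc]
          rw [hcol, pvAnn_map_indep t g v p o (o + 1)]

def pvFilt (c : String) (xs : List String) : List String :=
  xs.filter (fun s => classify_alt s == c)

lemma pvAnn_filter_gas (xs : List String) : ∀ g v p o,
    (pvAnn xs g v p o).filter (fun q => classify_alt q.1 == "gas") =
    (PySem.List.enumerate (pvFilt "gas" xs) g).map (fun q => (q.2, q.1)) := by
  induction xs with
  | nil => intro g v p o; simp [pvAnn, pvFilt]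
  | cons s t ih =>
    intro g v p o
    rcases pv_classify_cases s with h | h | h | h <;>
      simp [pvAnn, h, pvFilt, PySem.List.enumerate_cons, ih]

lemma pvAnn_filter_voc (xs : List String) : ∀ g v p o,
    (pvAnn xs g v p o).filter (fun q => classify_alt q.1 == "voc") =
    (PySem.List.enumerate (pvFilt "voc" xs) v).map (fun q => (q.2, q.1)) := by
  induction xs with
  | nil => intro g v p o; simp [pvAnn, pvFilt]
  | cons s t ih =>
    intro g v p o
    rcases pv_classify_cases s with h | h | h | h <;>
      simp [pvAnn, h, pvFilt, PySem.List.enumerate_cons, ih]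

lemma pvAnn_filter_pm (xs : List String) : ∀ g v p o,
    (pvAnn xs g v p o).filter (fun q => classify_alt q.1 == "pm") =
    (PySem.List.enumerate (pvFilt "pm" xs) p).map (fun q => (q.2, q.1)) := by
  induction xs with
  | nil => intro g v p o; simp [pvAnn, pvFilt]
  | cons s t ih =>
    intro g v p o
    rcases pv_classify_cases s with h | h | h | h <;>
      simp [pvAnn, h, pvFilt, PySem.List.enumerate_cons, ih]

lemma pvAnn_filter_other (xs : List String) : ∀ g v p o,
    (pvAnn xs g v p o).filter (fun q => classify_alt q.1 == "other") =
    (PySem.List.enumerate (pvFilt "other" xs) o).map (fun q => (q.2, q.1)) := by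
  induction xs with
  | nil => intro g v p o; simp [pvAnn, pvFilt]
  | cons s t ih =>
    intro g v p o
    rcases pv_classify_cases s with h | h | h | h <;>
      simp [pvAnn, h, pvFilt, PySem.List.enumerate_cons, ih]

lemma pv_groups_eq (xs : List String) : ∀ (a b c e : List String),
    xs.foldl (fun d s => d.modify (classify_alt s) [] (fun l => l ++ [s]))
      (PySem.Dict.mk [("gas", a), ("voc", b), ("pm", c), ("other", e)]) =
    PySem.Dict.mk [("gas", a ++ pvFilt "gas" xs), ("voc", b ++ pvFilt "voc" xs),
                   ("pm", c ++ pvFilt "pm" xs), ("other", e ++ pvFilt "other" xs)] := by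
  induction xs with
  | nil => intro a b c e; simp [pvFilt]
  | cons s t ih =>
    intro a b c e
    rcases pv_classify_cases s with h | h | h | h <;>
      [ (have hs : (PySem.Dict.mk [("gas", a), ("voc", b), ("pm", c), ("other", e)]).modify
            (classify_alt s) [] (fun l => l ++ [s]) =
            PySem.Dict.mk [("gas", a ++ [s]), ("voc", b), ("pm", c), ("other", e)] := by
          rw [h]
          simp [PySem.Dict.modify, PySem.Dict.insert, PySem.Dict.getD, PySem.Dict.get?,
            PySem.Dict.contains]);
        (have hs : (PySem.Dict.mk [("gas", a), ("voc", b), ("pm", c), ("other", e)]).modify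
            (classify_alt s) [] (fun l => l ++ [s]) =
            PySem.Dict.mk [("gas", a), ("voc", b ++ [s]), ("pm", c), ("other", e)] := by
          rw [h]
          simp [PySem.Dict.modify, PySem.Dict.insert, PySem.Dict.getD, PySem.Dict.get?,
            PySem.Dict.contains]);
        (have hs : (PySem.Dict.mk [("gas", a), ("voc", b), ("pm", c), ("other", e)]).modify
            (classify_alt s) [] (fun l => l ++ [s]) =
            PySem.Dict.mk [("gas", a), ("voc", b), ("pm", c ++ [s]), ("other", e)] := by
          rw [h]
          simp [PySem.Dict.modify, PySem.Dict.insert, PySem.Dict.getD, PySem.Dict.get?,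
            PySem.Dict.contains]);
        (have hs : (PySem.Dict.mk [("gas", a), ("voc", b), ("pm", c), ("other", e)]).modify
            (classify_alt s) [] (fun l => l ++ [s]) =
            PySem.Dict.mk [("gas", a), ("voc", b), ("pm", c), ("other", e ++ [s])] := by
          rw [h]
          simp [PySem.Dict.modify, PySem.Dict.insert, PySem.Dict.getD, PySem.Dict.get?,
            PySem.Dict.contains])] <;>
    · rw [List.foldl_cons, hs, ih]
      simp [pvFilt, h]

-- B's per-category colour assignment, as an insert-fold over key/value pairs
def pvStage (c : String) (l : List String) : List (String × String) :=
  (PySem.List.enumerate l).map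
    (fun q => (q.2, PySem.List.pyGetD (pvPalettes.getD c [])
      (PySem.Int.mod q.1 (((pvPalettes.getD c []).length : Int))) ""))

def pvColorsD (xs : List String) : PySem.Dict String String :=
  (pvStage "other" (pvFilt "other" xs)).foldl (fun d r => d.insert r.1 r.2)
    ((pvStage "pm" (pvFilt "pm" xs)).foldl (fun d r => d.insert r.1 r.2)
      ((pvStage "voc" (pvFilt "voc" xs)).foldl (fun d r => d.insert r.1 r.2)
        ((pvStage "gas" (pvFilt "gas" xs)).foldl (fun d r => d.insert r.1 r.2) PySem.Dict.empty)))

lemma pvStage_map_fst (c : String) (l : List String) : (pvStage c l).map Prod.fst = l := by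
  simp [pvStage, List.map_map, Function.comp_def]

lemma pv_not_mem_filt (k : String) (c : String) (xs : List String) (h : classify_alt k ≠ c) :
    k ∉ pvFilt c xs := by
  intro hm
  rcases List.mem_filter.mp hm with ⟨-, hck⟩
  exact h (beq_iff_eq.mp hck)

lemma pv_find?_stage (c : String) (l : List String) (k : String) :
    (pvStage c l).reverse.find? (fun r => r.1 == k) =
    ((PySem.List.enumerate l 0).reverse.find? (fun q => q.2 == k)).map
      (fun q => (q.2, PySem.List.pyGetD (pvPalettes.getD c [])
        (PySem.Int.mod q.1 (((pvPalettes.getD c []).length : Int))) "")) := by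
  simp only [pvStage, ← List.map_reverse, List.find?_map, Function.comp_def]

lemma pv_peel (xs : List String) (k : String) (c : String) (d : PySem.Dict String String)
    (hne : classify_alt k ≠ c) :
    ((pvStage c (pvFilt c xs)).foldl (fun d r => d.insert r.1 r.2) d).getD k "" =
    d.getD k "" := by
  refine pv_getD_foldl_ins_not_mem _ _ _ ?_
  rw [pvStage_map_fst]
  exact pv_not_mem_filt k c xs hne

lemma pv_own (xs : List String) (k : String) (c : String) (d : PySem.Dict String String) :
    ((pvStage c (pvFilt c xs)).foldl (fun d r => d.insert r.1 r.2) d).getD k "" =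
    (((PySem.List.enumerate (pvFilt c xs) 0).reverse.find? (fun q => q.2 == k)).map
      (fun q => PySem.List.pyGetD (pvPalettes.getD c [])
        (PySem.Int.mod q.1 (((pvPalettes.getD c []).length : Int))) "")).getD
      (d.getD k "") := by
  rw [pv_getD_foldl_ins, pv_find?_stage]
  cases (PySem.List.enumerate (pvFilt c xs) 0).reverse.find? (fun q => q.2 == k) with
  | none => simp
  | some q => simp

lemma pv_getD_colorsD (xs : List String) (k : String) :
    (pvColorsD xs).getD k "" =
    (((PySem.List.enumerate (pvFilt (classify_alt k) xs) 0).reverse.find?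
        (fun q => q.2 == k)).map
      (fun q => PySem.List.pyGetD (pvPalettes.getD (classify_alt k) [])
        (PySem.Int.mod q.1 (((pvPalettes.getD (classify_alt k) []).length : Int))) "")).getD
      "" := by
  rcases pv_classify_cases k with hc | hc | hc | hc <;> rw [pvColorsD, hc]
  · rw [pv_peel xs k _ _ (by rw [hc]; decide), pv_peel xs k _ _ (by rw [hc]; decide),
      pv_peel xs k _ _ (by rw [hc]; decide), pv_own xs k "gas" PySem.Dict.empty]
    simp
  · rw [pv_peel xs k _ _ (by rw [hc]; decide), pv_peel xs k _ _ (by rw [hc]; decide),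
      pv_own xs k "voc" _, pv_peel xs k _ _ (by rw [hc]; decide)]
    simp
  · rw [pv_peel xs k _ _ (by rw [hc]; decide), pv_own xs k "pm" _,
      pv_peel xs k _ _ (by rw [hc]; decide), pv_peel xs k _ _ (by rw [hc]; decide)]
    simp
  · rw [pv_own xs k "other" _, pv_peel xs k _ _ (by rw [hc]; decide),
      pv_peel xs k _ _ (by rw [hc]; decide), pv_peel xs k _ _ (by rw [hc]; decide)]
    simp

lemma pvA_getD (xs : List String) (k : String) :
    ((((pvAnn xs 0 0 0 0).map (fun q => (q.1, pvColorFor q))).foldl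
        (fun d r => d.insert r.1 r.2) PySem.Dict.empty)).getD k "" =
    (((PySem.List.enumerate (pvFilt (classify_alt k) xs) 0).reverse.find?
        (fun q => q.2 == k)).map (fun q => pvColorFor (q.2, q.1))).getD "" := by
  rw [pv_getD_foldl_ins]
  have h2 : (pvAnn xs 0 0 0 0).reverse.find? (fun q => q.1 == k)
      = (((pvAnn xs 0 0 0 0).filter
            (fun q => classify_alt q.1 == classify_alt k)).reverse).find?
          (fun q => q.1 == k) := by
    rw [← List.filter_reverse]
    rw [pv_find?_filter]
    intro x hx
    simp only [beq_iff_eq] at hx ⊢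
    rw [hx]
  have h3 : ((pvAnn xs 0 0 0 0).filter (fun q => classify_alt q.1 == classify_alt k))
      = (PySem.List.enumerate (pvFilt (classify_alt k) xs) 0).map (fun q => (q.2, q.1)) := by
    rcases pv_classify_cases k with hc | hc | hc | hc
    · rw [hc]; exact pvAnn_filter_gas xs 0 0 0 0
    · rw [hc]; exact pvAnn_filter_voc xs 0 0 0 0
    · rw [hc]; exact pvAnn_filter_pm xs 0 0 0 0
    · rw [hc]; exact pvAnn_filter_other xs 0 0 0 0
  simp only [← List.map_reverse, List.find?_map, Function.comp_def]
  rw [h2, h3]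
  simp only [← List.map_reverse, List.find?_map, Function.comp_def]
  cases (PySem.List.enumerate (pvFilt (classify_alt k) xs) 0).reverse.find?
      (fun q => q.2 == k) with
  | none => simp
  | some q => simp

lemma pv_value_agree (xs : List String) (k : String) :
    ((((pvAnn xs 0 0 0 0).map (fun q => (q.1, pvColorFor q))).foldl
        (fun d r => d.insert r.1 r.2) PySem.Dict.empty)).getD k "" =
    (pvColorsD xs).getD k "" := by
  rw [pvA_getD, pv_getD_colorsD]
  cases hf : (PySem.List.enumerate (pvFilt (classify_alt k) xs) 0).reverse.find?
      (fun q => q.2 == k) with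
  | none => simp
  | some q =>
    have hq : q.2 = k := by have h := List.find?_some hf; simpa using h
    simp only [Option.map_some, Option.getD_some]
    rw [hq]
    rcases pv_classify_cases k with hc | hc | hc | hc
    · rw [hc]
      simp [pvColorFor, hc, show pvPalettes.getD "gas" [] = pvGasPal from rfl]
    · rw [hc]
      simp [pvColorFor, hc, show pvPalettes.getD "voc" [] = pvVocPal from rfl]
    · rw [hc]
      simp [pvColorFor, hc, show pvPalettes.getD "pm" [] = pvPmPal from rfl]
    · rw [hc]
      rw [show pvPalettes.getD "other" [] = ["#95a5a6"] from rfl]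
      simp [pvColorFor, hc, PySem.List.pyGetD]

lemma pvB_final_getD (colors : PySem.Dict String String) (xs : List String) (k : String)
    (hk : k ∈ xs) :
    (xs.foldl (fun d s => d.insert s (colors.getD s "")) PySem.Dict.empty).getD k "" =
    colors.getD k "" := by
  have hrw : xs.foldl (fun d s => d.insert s (colors.getD s "")) PySem.Dict.empty
      = (xs.map (fun t => (t, colors.getD t ""))).foldl (fun d r => d.insert r.1 r.2)
          PySem.Dict.empty := by
    rw [List.foldl_map]
  rw [hrw, pv_getD_foldl_ins]
  simp only [← List.map_reverse, List.find?_map, Function.comp_def]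
  cases hf : xs.reverse.find? (fun t => t == k) with
  | none =>
    exfalso
    rw [List.find?_eq_none] at hf
    have := hf k (List.mem_reverse.mpr hk)
    simp at this
  | some t =>
    have ht : t = k := by have h := List.find?_some hf; simpa using h
    simp [ht]

lemma pv_main (xs : List String) : get_species_colors_py xs = get_species_colors_py_alt xs := by
  unfold get_species_colors_py get_species_colors_py_alt
  rw [pvA_loop xs PySem.Dict.empty 0 0 0 0]
  have h0 : PySem.Dict.ofList [("gas", ([] : List String)), ("voc", []), ("pm", []), ("other", [])]
      = PySem.Dict.mk [("gas", []), ("voc", []), ("pm", []), ("other", [])] := rfl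
  rw [h0, pv_groups_eq]
  simp only [List.nil_append]
  simp only [List.foldl_cons, List.foldl_nil]
  have hcolors : ∀ (cd : PySem.Dict String String) (c : String) (l : List String),
      (PySem.List.enumerate l).foldl
        (fun cd q => cd.insert q.2 (PySem.List.pyGetD (pvPalettes.getD c [])
          (PySem.Int.mod q.1 (((pvPalettes.getD c []).length : Int))) "")) cd
      = (pvStage c l).foldl (fun d r => d.insert r.1 r.2) cd := by
    intro cd c l
    rw [pvStage, List.foldl_map]
  rw [hcolors, hcolors, hcolors, hcolors]
  have hD : pvColorsD xs
      = (pvStage "other" (pvFilt "other" xs)).foldl (fun d r => d.insert r.1 r.2)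
          ((pvStage "pm" (pvFilt "pm" xs)).foldl (fun d r => d.insert r.1 r.2)
            ((pvStage "voc" (pvFilt "voc" xs)).foldl (fun d r => d.insert r.1 r.2)
              ((pvStage "gas" (pvFilt "gas" xs)).foldl (fun d r => d.insert r.1 r.2)
                PySem.Dict.empty))) := rfl
  rw [← hD]
  -- keys of both final dicts
  have hKA : ((List.map (fun q => (q.1, pvColorFor q)) (pvAnn xs 0 0 0 0)).foldl
      (fun d r => d.insert r.1 r.2) PySem.Dict.empty).keys = PySem.Set.ofList xs := by
    have h := PySem.Dict.keys_foldl_insert_key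
      (List.map (fun q => (q.1, pvColorFor q)) (pvAnn xs 0 0 0 0)) Prod.fst
      (fun _ r => r.2) PySem.Dict.empty
    simpa [List.map_map, Function.comp_def, pvAnn_map_fst, PySem.Set.update_nil_left] using h
  have hNA : ((List.map (fun q => (q.1, pvColorFor q)) (pvAnn xs 0 0 0 0)).foldl
      (fun d r => d.insert r.1 r.2) PySem.Dict.empty).keys.Nodup :=
    PySem.Dict.nodup_keys_foldl_insert_key _ Prod.fst (fun _ r => r.2) _
      (by simp [PySem.Dict.keys_empty])
  have hKB : (xs.foldl (fun d s => d.insert s ((pvColorsD xs).getD s ""))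
      PySem.Dict.empty).keys = PySem.Set.ofList xs := by
    have h := PySem.Dict.keys_foldl_insert xs (fun _ s => (pvColorsD xs).getD s "")
      PySem.Dict.empty
    simpa [PySem.Set.update_nil_left] using h
  have hNB : (xs.foldl (fun d s => d.insert s ((pvColorsD xs).getD s ""))
      PySem.Dict.empty).keys.Nodup :=
    PySem.Dict.nodup_keys_foldl_insert xs (fun _ s => (pvColorsD xs).getD s "") _
      (by simp [PySem.Dict.keys_empty])
  rw [PySem.Dict.items_eq_map_keys _ hNA "", PySem.Dict.items_eq_map_keys _ hNB "", hKA, hKB]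
  apply List.map_congr_left
  intro k hkmem
  have hk : k ∈ xs := (PySem.Set.mem_ofList _ _).mp hkmem
  have := (pv_value_agree xs k).trans (pvB_final_getD (pvColorsD xs) xs k hk).symm
  simp only [Prod.mk.injEq, true_and]
  exact this

theorem get_species_colors_py_spec : Claim_equal_get_species_colors_py := by
  intro xs _
  unfold Spec_get_species_colors_py
  exact pv_main xs
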